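-- pv_equiv track=rewrite | github.com/mega-mac-slice/learn-python | src/2018_10_01_1538450506/main.py | solve
-- ===== SOURCE A (Python) =====
-- import math
--
-- def solve(value: int) -> int:
--     freq = [0 for _ in range(10)]
--
--     while value > 0:
--         digit = int(math.floor(value % 10))
--         freq[digit] += 1
--         value = int(value / 10)
--
--     result = 0
--     multiplier = 0
--     for value in range(1, 10)[::-1]:
--         count = freq[value]
--         for _ in range(count):
--             result += value * 10 ** multiplier
--             multiplier += 1
--
--     return result
-- ===== SOURCE B (Python) =====
-- def solve(value: int) -> int:
--     # Collect the decimal digits, drop zeros, comparison-sort ascending,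
--     # and fold them back into a number most-significant-first.
--     digits = []
--     n = value
--     while n > 0:
--         digits.append(n % 10)
--         n //= 10
--     result = 0
--     for d in sorted(x for x in digits if x != 0):
--         result = result * 10 + d
--     return result
-- ===== Notes on version B (the rewrite author's own statement) =====
-- stated objective: idiomatic
-- what changed: Replaces A's ten-bucket digit-frequency counting-sort reconstruction (descending bucket emit with an explicit power-of-ten multiplier) by collecting the digit list, comparison-sorting the nonzero digits ascending, and folding them back with result = result*10 + d.
import Mathlib
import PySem

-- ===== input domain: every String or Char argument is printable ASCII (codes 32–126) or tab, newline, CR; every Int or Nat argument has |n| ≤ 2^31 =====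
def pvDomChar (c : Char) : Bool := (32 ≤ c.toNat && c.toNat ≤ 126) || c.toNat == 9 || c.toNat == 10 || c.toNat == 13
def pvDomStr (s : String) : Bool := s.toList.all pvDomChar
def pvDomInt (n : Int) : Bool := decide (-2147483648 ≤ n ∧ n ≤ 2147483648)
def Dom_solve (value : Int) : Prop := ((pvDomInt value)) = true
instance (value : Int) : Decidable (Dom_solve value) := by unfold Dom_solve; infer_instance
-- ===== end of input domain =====

-- B replaces A's ten-bucket digit-frequency counting-sort reconstruction by a comparison
-- sort of the nonzero digits folded back most-significant-first (objective: more idiomatic).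

-- ===== PORT A =====
-- while value > 0: freq[value % 10] += 1; value = int(value / 10)
-- (int(value/10) is exact integer floor division for 0 < value ≤ 2^31, inside Dom_solve)
def solveCount (value : Int) (freq : List Int) : List Int :=
  if 0 < value then
    let digit := PySem.Int.mod value 10   -- int(math.floor(value % 10)) = value % 10 on ints
    solveCount (PySem.Int.floordiv value 10)
      (PySem.List.pySetD freq digit (PySem.List.pyGetD freq digit 0 + 1))
  else freq
termination_by value.toNat
decreasing_by
  rename_i h
  simp only [PySem.Int.floordiv_eq_ediv_of_pos (by norm_num : (0:Int) < 10)]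
  omega

def solve (value : Int) : Int :=
  let freq := solveCount value (List.replicate 10 0)
  -- for value in range(1, 10)[::-1]: …  (10 ** multiplier: multiplier stays ≥ 0, so ^ toNat is exact)
  let p := ((PySem.List.slice? (PySem.List.pyRange 1 10 1) none none (-1)).getD []).foldl
    (fun (rm : Int × Int) v =>
      let count := PySem.List.pyGetD freq v 0
      (PySem.List.pyRange 0 count 1).foldl
        (fun rm _ => (rm.1 + v * 10 ^ rm.2.toNat, rm.2 + 1)) rm)
    ((0 : Int), (0 : Int))
  p.1

-- ===== PORT B =====
-- while n > 0: digits.append(n % 10); n //= 10   (list built least-significant digit first)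
def solveDigitsB (n : Int) : List Int :=
  if 0 < n then PySem.Int.mod n 10 :: solveDigitsB (PySem.Int.floordiv n 10) else []
termination_by n.toNat
decreasing_by
  rename_i h
  simp only [PySem.Int.floordiv_eq_ediv_of_pos (by norm_num : (0:Int) < 10)]
  omega

def solve_alt (value : Int) : Int :=
  let digits := solveDigitsB value
  (PySem.List.sorted (digits.filter (fun x => x != 0)) (fun x => x) false).foldl
    (fun r d => r * 10 + d) 0

-- ===== PRECONDITION & SPEC =====
def Spec_solve (value : Int) (out : Int) : Prop := out = solve_alt value
instance (value : Int) (out : Int) : Decidable (Spec_solve value out) := by unfold Spec_solve; infer_instance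

-- ===== CLAIM (what is proved, stated in full; the proofs are below) =====
def Claim_equal_solve : Prop := ∀ (value : Int), Dom_solve value → Spec_solve value (solve value)

-- ===== LEMMAS AND PROOFS =====

-- value of a digit list, least-significant digit first
def pvValDesc : List Int → Int
  | [] => 0
  | e :: l => e + 10 * pvValDesc l

theorem pvValDesc_append (xs : List Int) (e : Int) :
    pvValDesc (xs ++ [e]) = pvValDesc xs + e * 10 ^ xs.length := by
  induction xs with
  | nil => simp [pvValDesc]
  | cons x xs ih => simp [pvValDesc, ih]; ring

-- A's counting loop is B's digit list folded through the bump
theorem solveCount_eq_foldl (value : Int) (freq : List Int) :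
    solveCount value freq = (solveDigitsB value).foldl
      (fun f e => PySem.List.pySetD f e (PySem.List.pyGetD f e 0 + 1)) freq := by
  induction value, freq using solveCount.induct with
  | case1 value freq h digit ih =>
    rw [solveCount, if_pos h, ih]
    conv_rhs => rw [solveDigitsB, if_pos h]
    rw [List.foldl_cons]
  | case2 value freq h =>
    rw [solveCount, if_neg h, solveDigitsB, if_neg h]
    simp

theorem mem_solveDigitsB {d n : Int} (h : d ∈ solveDigitsB n) : 0 ≤ d ∧ d < 10 := by
  induction n using solveDigitsB.induct with
  | case1 n hn ih =>
    rw [solveDigitsB, if_pos hn] at h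
    rcases List.mem_cons.mp h with h | h
    · subst h
      exact ⟨PySem.Int.mod_nonneg _ (by norm_num), PySem.Int.mod_lt _ (by norm_num)⟩
    · exact ih h
  | case2 n hn => rw [solveDigitsB, if_neg hn] at h; simp at h

-- counting characterization of the bump fold
theorem foldl_bump_count (L : List Int) (hL : ∀ d ∈ L, 0 ≤ d ∧ d < 10) :
    ∀ (f : List Int), f.length = 10 → ∀ d : Int, 0 ≤ d → d < 10 →
      PySem.List.pyGetD (L.foldl (fun f e => PySem.List.pySetD f e (PySem.List.pyGetD f e 0 + 1)) f) d 0
        = PySem.List.pyGetD f d 0 + L.count d := by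
  induction L with
  | nil => intro f _ d _ _; simp
  | cons e L ih =>
    intro f hf d hd0 hd10
    obtain ⟨he0, he10⟩ := hL e (List.mem_cons_self ..)
    have hcast : e = ((e.toNat : Nat) : Int) := by omega
    rw [List.foldl_cons,
      ih (fun x hx => hL x (List.mem_cons_of_mem _ hx)) _
        (by rw [hcast, PySem.List.pySetD_natCast, List.length_set, hf]) d hd0 hd10,
      hcast]
    have hdcast : d = ((d.toNat : Nat) : Int) := by omega
    rw [hdcast, PySem.List.pyGetD_pySetD_natCast f e.toNat d.toNat _ 0 (by omega), List.count_cons]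
    by_cases hde : d.toNat = e.toNat
    · rw [if_pos hde, hde]; simp; ring
    · rw [if_neg hde]
      simp
      omega

-- a fold that ignores its elements only depends on the length
theorem foldl_ignore {α β γ : Type} (g : γ → γ) (i : γ) (l1 : List α) (l2 : List β)
    (h : l1.length = l2.length) :
    l1.foldl (fun s _ => g s) i = l2.foldl (fun s _ => g s) i := by
  induction l1 generalizing l2 i with
  | nil => cases l2 <;> simp_all
  | cons x l1 ih =>
    cases l2 with
    | nil => simp_all
    | cons y l2 => simpa using ih (g i) l2 (by simpa using h)

theorem foldl_flatMap_emit {β : Type} (step : β → Int → β) (ds : List Int)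
    (g : Int → List Int) (init : β) :
    (ds.flatMap g).foldl step init = ds.foldl (fun s d => (g d).foldl step s) init := by
  induction ds generalizing init with
  | nil => simp
  | cons d ds ih => simp [List.flatMap_cons, List.foldl_append, ih]

theorem emit_val (l : List Int) (r : Int) (m : Nat) :
    l.foldl (fun (rm : Int × Int) e => (rm.1 + e * 10 ^ rm.2.toNat, rm.2 + 1)) (r, (m : Int))
      = (r + pvValDesc l * 10 ^ m, (m : Int) + l.length) := by
  induction l generalizing r m with
  | nil => simp [pvValDesc]
  | cons e l ih =>
    have : ((m : Int) + 1) = ((m + 1 : Nat) : Int) := by push_cast; ring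
    simp only [List.foldl_cons, Int.toNat_natCast, this, ih, pvValDesc]
    rw [Prod.mk.injEq]
    refine ⟨by ring, by simp; ring⟩

theorem foldl_asc (l : List Int) (r : Int) :
    l.foldl (fun r d => r * 10 + d) r = r * 10 ^ l.length + pvValDesc l.reverse := by
  induction l generalizing r with
  | nil => simp [pvValDesc]
  | cons d l ih =>
    simp only [List.foldl_cons, ih, List.reverse_cons, pvValDesc_append, List.length_reverse,
      List.length_cons]
    ring

theorem count_flatMap_replicate (ds : List Int) (hnd : ds.Nodup) (c : Int → Nat) (x : Int) :
    (ds.flatMap fun d => List.replicate (c d) d).count x = if x ∈ ds then c x else 0 := by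
  induction ds with
  | nil => simp
  | cons d ds ih =>
    simp only [List.flatMap_cons, List.count_append, List.count_replicate,
      ih (List.nodup_cons.mp hnd).2, List.mem_cons]
    rcases List.nodup_cons.mp hnd with ⟨hd, _⟩
    by_cases hx : x = d
    · subst hx; simp [hd]
    · simp [hx]; intro h; exact (hx h.symm).elim

theorem pairwise_flatMap_replicate (ds : List Int) (hp : ds.Pairwise (· ≤ ·)) (c : Int → Nat) :
    (ds.flatMap fun d => List.replicate (c d) d).Pairwise (· ≤ ·) := by
  induction ds with
  | nil => simp
  | cons d ds ih =>
    simp only [List.flatMap_cons]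
    rw [List.pairwise_append]
    refine ⟨List.pairwise_replicate.mpr (Or.inr le_rfl), ih hp.of_cons, ?_⟩
    intro x hx y hy
    have hx' : x = d := List.eq_of_mem_replicate hx
    obtain ⟨d', hd', hy'⟩ := List.mem_flatMap.mp hy
    have : y = d' := List.eq_of_mem_replicate hy'
    subst hx' this
    exact List.rel_of_pairwise_cons hp hd'

theorem sorted_eq_flatMap (L : List Int) (hL : ∀ d ∈ L, 1 ≤ d ∧ d < 10) :
    PySem.List.sorted L (fun x => x) false
      = (PySem.List.pyRange 1 10 1).flatMap (fun d => List.replicate (L.count d) d) := by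
  apply PySem.List.sorted_id_eq_of_perm_of_pairwise
  · apply List.perm_iff_count.mpr
    intro x
    rw [count_flatMap_replicate _ (PySem.List.nodup_pyRange_one 1 10) (fun d => L.count d) x]
    by_cases hx : x ∈ PySem.List.pyRange 1 10 1
    · simp [hx]
    · rw [if_neg hx, eq_comm, List.count_eq_zero]
      intro hmem
      exact hx (PySem.List.mem_pyRange_one.mpr (by
        obtain ⟨h1, h2⟩ := hL x hmem; exact ⟨h1, h2⟩))
  · exact pairwise_flatMap_replicate _
      (List.Pairwise.imp (fun h => le_of_lt h) (PySem.List.pairwise_lt_pyRange_one 1 10)) _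

theorem foldl_replicate_emit (n : Nat) (v : Int)
    (step : (Int × Int) → Int → (Int × Int)) (rm : Int × Int) :
    (List.replicate n v).foldl (fun s _ => step s v) rm = (List.replicate n v).foldl step rm := by
  induction n generalizing rm with
  | zero => simp
  | succ n ih => simp [List.replicate_succ, ih]

theorem solve_eq_valDesc (value : Int) :
    solve value = pvValDesc (((PySem.List.pyRange 1 10 1).reverse).flatMap
      (fun v => List.replicate ((solveDigitsB value).count v) v)) := by
  have hmem : ∀ d ∈ solveDigitsB value, 0 ≤ d ∧ d < 10 := fun d h => mem_solveDigitsB h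
  have hfreq : ∀ d : Int, 1 ≤ d → d < 10 →
      PySem.List.pyGetD (solveCount value (List.replicate 10 0)) d 0
        = ((solveDigitsB value).count d : Int) := by
    intro d h1 h2
    rw [solveCount_eq_foldl, foldl_bump_count _ hmem _ (by simp) d (by omega) h2]
    have hc : d = ((d.toNat : Nat) : Int) := by omega
    rw [hc, PySem.List.pyGetD_natCast]
    simp
    have h10 : d.toNat < 10 := by omega
    set k := d.toNat
    interval_cases k <;> rfl
  unfold solve
  show (((PySem.List.slice? (PySem.List.pyRange 1 10 1) none none (-1)).getD []).foldl
      (fun (rm : Int × Int) v =>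
        (PySem.List.pyRange 0 (PySem.List.pyGetD (solveCount value (List.replicate 10 0)) v 0) 1).foldl
          (fun rm _ => (rm.1 + v * 10 ^ rm.2.toNat, rm.2 + 1)) rm)
      ((0 : Int), (0 : Int))).1 = _
  simp only [PySem.List.slice?_none_none_neg_one, Option.getD_some]
  have hcong : ((PySem.List.pyRange 1 10 1).reverse).foldl
      (fun (rm : Int × Int) v =>
        (PySem.List.pyRange 0 (PySem.List.pyGetD (solveCount value (List.replicate 10 0)) v 0) 1).foldl
          (fun rm _ => (rm.1 + v * 10 ^ rm.2.toNat, rm.2 + 1)) rm)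
      ((0 : Int), (0 : Int))
    = ((PySem.List.pyRange 1 10 1).reverse).foldl
      (fun (rm : Int × Int) v => (List.replicate ((solveDigitsB value).count v) v).foldl
        (fun (rm : Int × Int) e => (rm.1 + e * 10 ^ rm.2.toNat, rm.2 + 1)) rm)
      ((0 : Int), (0 : Int)) := by
    apply PySem.List.foldl_congr_mem
    intro acc v hv
    obtain ⟨hv1, hv2⟩ := PySem.List.mem_pyRange_one.mp (List.mem_reverse.mp hv)
    rw [hfreq v hv1 hv2]
    calc (PySem.List.pyRange 0 ((solveDigitsB value).count v : Int) 1).foldl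
          (fun (rm : Int × Int) _ => (rm.1 + v * 10 ^ rm.2.toNat, rm.2 + 1)) acc
        = (List.replicate ((solveDigitsB value).count v) v).foldl
          (fun (rm : Int × Int) _ => (rm.1 + v * 10 ^ rm.2.toNat, rm.2 + 1)) acc := by
          apply foldl_ignore
          simp [PySem.List.length_pyRange_one]
      _ = _ := foldl_replicate_emit _ _ (fun rm e => (rm.1 + e * 10 ^ rm.2.toNat, rm.2 + 1)) acc
  rw [hcong, ← foldl_flatMap_emit]
  have h0 : ((0 : Int), (0 : Int)) = ((0 : Int), ((0 : Nat) : Int)) := by norm_num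
  rw [h0, emit_val]
  simp

theorem solve_alt_eq_valDesc (value : Int) :
    solve_alt value = pvValDesc ((((PySem.List.pyRange 1 10 1)).flatMap
      (fun v => List.replicate ((solveDigitsB value).count v) v)).reverse) := by
  have hmem : ∀ d ∈ solveDigitsB value, 0 ≤ d ∧ d < 10 := fun d h => mem_solveDigitsB h
  have hLf : ∀ d ∈ (solveDigitsB value).filter (fun x => x != 0), 1 ≤ d ∧ d < 10 := by
    intro d hd
    obtain ⟨hd1, hd2⟩ := List.mem_filter.mp hd
    obtain ⟨h1, h2⟩ := hmem d hd1
    have : d ≠ 0 := by simpa using hd2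
    exact ⟨by omega, h2⟩
  unfold solve_alt
  show (PySem.List.sorted ((solveDigitsB value).filter (fun x => x != 0)) (fun x => x) false).foldl
      (fun r d => r * 10 + d) 0 = _
  rw [sorted_eq_flatMap _ hLf,
    List.flatMap_congr (g := fun v => List.replicate ((solveDigitsB value).count v) v)
      (by
        intro d hd
        obtain ⟨h1, _⟩ := PySem.List.mem_pyRange_one.mp hd
        have hne : ((d != 0) = true) := by simp; omega
        rw [List.count_filter (p := fun x => x != 0) (a := d) hne]),
    foldl_asc]
  simp

-- ===== VERDICT (by name: the statement is the Claim_ definition above) =====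
theorem solve_spec : Claim_equal_solve := by
  intro value _
  unfold Spec_solve
  rw [solve_eq_valDesc, solve_alt_eq_valDesc, List.reverse_flatMap]
  simp [Function.comp_def]
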